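-- pv_equiv track=rewrite | github.com/Dstrand10/hobby-projects | AdventOfCode2015/Day19/Day19.py | iterateMolecule
-- ===== SOURCE A (Python) =====
-- def iterateMolecule(molecule, rules):
--     newMolecules = set()
--     for (key, val) in rules:
--         keyIdx = 0
--         while key in molecule[keyIdx:]:
--             tmp_molecule = molecule[keyIdx:]
--             currIdx = keyIdx + tmp_molecule.index(key)
--             newMolecules.add(molecule[:currIdx] + val + molecule[currIdx + len(key):])
--             keyIdx = currIdx + len(key)
--     return list(newMolecules)
-- ===== SOURCE B (Python) =====
-- def iterateMolecule(molecule, rules):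
--     newMolecules = set()
--     for key, val in rules:
--         parts = molecule.split(key)
--         for i in range(len(parts) - 1):
--             newMolecules.add(key.join(parts[:i + 1]) + val + key.join(parts[i + 1:]))
--     return list(newMolecules)
-- ===== Notes on version B (the rewrite author's own statement) =====
-- stated objective: alternative
-- what changed: A scans each rule's key with an index cursor and repeated `in`/`.index` on shrinking suffix slices; B contains no search loop at all: it calls str.split(key) once per rule and reconstructs each single-replacement molecule as key.join(parts[:i+1]) + val + key.join(parts[i+1:]).
import Mathlib
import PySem

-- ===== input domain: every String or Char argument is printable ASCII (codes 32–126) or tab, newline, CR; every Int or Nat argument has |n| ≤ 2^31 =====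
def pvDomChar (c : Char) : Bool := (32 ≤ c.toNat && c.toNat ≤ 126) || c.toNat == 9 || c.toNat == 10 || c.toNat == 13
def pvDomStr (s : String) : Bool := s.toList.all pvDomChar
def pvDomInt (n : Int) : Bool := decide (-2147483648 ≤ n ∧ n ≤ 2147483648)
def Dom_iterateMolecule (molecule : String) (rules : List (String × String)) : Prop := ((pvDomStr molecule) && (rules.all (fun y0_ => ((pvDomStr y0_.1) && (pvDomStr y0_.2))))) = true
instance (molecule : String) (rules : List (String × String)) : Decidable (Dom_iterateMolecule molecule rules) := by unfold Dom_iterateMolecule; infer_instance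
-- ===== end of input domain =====

-- B drops A's cursor-and-search loop (`in` / `.index` on shrinking suffix slices) entirely:
-- it splits the molecule once per rule with str.split(key) and rebuilds each single-replacement
-- result with key.join over the parts; same cost class ("alternative"). Strings are handled as
-- List Char (the set holds code-point lists, String.ofList applied once at the end — dedup is
-- the same since String equality is List Char equality).

-- ===== PORT A =====
-- while key in molecule[keyIdx:] … ; fuel (molecule.length+1) only makes the loop total
-- (with a non-empty key the loop body runs at most molecule.length times; empty keys,
-- on which the Python loop never returns, are excluded by Pre_).
def pvALoop (mol key val : List Char) (fuel : Nat) (keyIdx : Nat)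
    (acc : PySem.Set (List Char)) : PySem.Set (List Char) :=
  match fuel with
  | 0 => acc
  | fuel + 1 =>
    if PySem.Chars.isIn key (mol.drop keyIdx) then
      -- currIdx = keyIdx + molecule[keyIdx:].index(key); add molecule[:currIdx]+val+molecule[currIdx+len(key):]
      pvALoop mol key val fuel
        ((keyIdx + (PySem.Chars.find (mol.drop keyIdx) key).toNat) + key.length)
        (PySem.Set.add acc
          (mol.take (keyIdx + (PySem.Chars.find (mol.drop keyIdx) key).toNat) ++ val ++
           mol.drop ((keyIdx + (PySem.Chars.find (mol.drop keyIdx) key).toNat) + key.length)))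
    else acc

def iterateMolecule (molecule : String) (rules : List (String × String)) : List String :=
  (rules.foldl
    (fun acc kv => pvALoop molecule.toList kv.1.toList kv.2.toList
      (molecule.toList.length + 1) 0 acc)
    PySem.Set.empty).map String.ofList

-- ===== PORT B =====
-- parts = molecule.split(key); for i in range(len(parts)-1):
--   add key.join(parts[:i+1]) + val + key.join(parts[i+1:])
-- (parts[:i+1] / parts[i+1:] with the nonnegative bound i+1 are List.take / List.drop;
--  len(parts) ≥ 1 always, so range(len(parts)-1) is List.range (parts.length - 1))
def iterateMolecule_alt (molecule : String) (rules : List (String × String)) : List String :=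
  (rules.foldl
    (fun acc kv =>
      (List.range ((PySem.Chars.splitOn molecule.toList kv.1.toList).length - 1)).foldl
        (fun a i => PySem.Set.add a
          (PySem.Chars.join kv.1.toList ((PySem.Chars.splitOn molecule.toList kv.1.toList).take (i + 1)) ++
           kv.2.toList ++
           PySem.Chars.join kv.1.toList ((PySem.Chars.splitOn molecule.toList kv.1.toList).drop (i + 1))))
        acc)
    PySem.Set.empty).map String.ofList

-- ===== PRECONDITION & SPEC =====
-- Pre_ excludes rules with an empty key: there Python A loops forever (never returns) and
-- Python B's str.split("") raises ValueError.
def Pre_iterateMolecule (molecule : String) (rules : List (String × String)) : Prop :=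
  ∀ kv ∈ rules, kv.1 ≠ ""
instance (molecule : String) (rules : List (String × String)) : Decidable (Pre_iterateMolecule molecule rules) := by unfold Pre_iterateMolecule; infer_instance
def pvWitness_iterateMolecule : String × (List (String × String)) := ("HOH", [("H", "HO"), ("H", "OH"), ("O", "HH")])

def Spec_iterateMolecule (molecule : String) (rules : List (String × String)) (out : List String) : Prop := out = iterateMolecule_alt molecule rules
instance (molecule : String) (rules : List (String × String)) (out : List String) : Decidable (Spec_iterateMolecule molecule rules out) := by unfold Spec_iterateMolecule; infer_instance

-- ===== CLAIM (what is proved, stated in full; the proofs are below) =====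
def Claim_equal_iterateMolecule : Prop := ∀ (molecule : String) (rules : List (String × String)), Dom_iterateMolecule molecule rules → Pre_iterateMolecule molecule rules → Spec_iterateMolecule molecule rules (iterateMolecule molecule rules)

-- ===== LEMMAS AND PROOFS =====

def pvConsHead (p : List Char) : List (List Char) → List (List Char)
  | [] => [p]
  | x :: xs => (p ++ x) :: xs

theorem pvConsHead_consHead (p q : List Char) (G : List (List Char)) :
    pvConsHead p (pvConsHead q G) = pvConsHead (p ++ q) G := by
  cases G <;> simp [pvConsHead]

theorem pvGo_split (sep : List Char) :
    ∀ (fuel : Nat) (l cur : List Char) (acc : List (List Char)),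
      PySem.Chars.splitOn.go sep fuel l cur acc =
        acc.reverse ++ pvConsHead cur.reverse (PySem.Chars.splitOn.go sep fuel l [] []) := by
  intro fuel
  induction fuel with
  | zero =>
    intro l cur acc
    rw [PySem.Chars.splitOn.go, PySem.Chars.splitOn.go]
    simp [pvConsHead]
  | succ fuel ih =>
    intro l cur acc
    cases l with
    | nil =>
      rw [PySem.Chars.splitOn.go, PySem.Chars.splitOn.go]
      · simp [pvConsHead]
      all_goals omega
    | cons c rest =>
      rw [PySem.Chars.splitOn.go]
      conv_rhs => rw [PySem.Chars.splitOn.go]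
      by_cases hp : sep.isPrefixOf (c :: rest) = true
      · rw [if_pos hp, if_pos hp]
        rw [ih, ih (List.drop sep.length (c :: rest)) [] [([] : List Char).reverse]]
        cases h : PySem.Chars.splitOn.go sep fuel (List.drop sep.length (c :: rest)) [] [] <;>
          simp [pvConsHead]
      · rw [if_neg hp, if_neg hp]
        rw [ih, ih rest [c] []]
        simp [pvConsHead_consHead]

theorem pvGo_ne_nil (sep : List Char) (fuel : Nat) (l cur : List Char) (acc : List (List Char)) :
    PySem.Chars.splitOn.go sep fuel l cur acc ≠ [] := by
  rw [pvGo_split]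
  cases h : PySem.Chars.splitOn.go sep fuel l [] [] <;> simp [pvConsHead]

theorem pvGo_fuel (sep : List Char) (hsep : sep ≠ []) :
    ∀ (fuel₁ fuel₂ : Nat) (l cur : List Char) (acc : List (List Char)),
      l.length ≤ fuel₁ → l.length ≤ fuel₂ →
      PySem.Chars.splitOn.go sep fuel₁ l cur acc = PySem.Chars.splitOn.go sep fuel₂ l cur acc := by
  intro fuel₁
  induction fuel₁ with
  | zero =>
    intro fuel₂ l cur acc h1 h2
    have : l = [] := by cases l <;> simp_all
    subst this
    cases fuel₂ with
    | zero => rfl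
    | succ f =>
      rw [PySem.Chars.splitOn.go, PySem.Chars.splitOn.go]
      · simp
      all_goals omega
  | succ fuel₁ ih =>
    intro fuel₂ l cur acc h1 h2
    cases l with
    | nil =>
      cases fuel₂ with
      | zero =>
        rw [PySem.Chars.splitOn.go, PySem.Chars.splitOn.go]
        · simp
        all_goals omega
      | succ f =>
        rw [PySem.Chars.splitOn.go, PySem.Chars.splitOn.go]
        all_goals omega
    | cons c rest =>
      cases fuel₂ with
      | zero => simp at h2
      | succ f =>
        rw [PySem.Chars.splitOn.go]
        conv_rhs => rw [PySem.Chars.splitOn.go]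
        by_cases hp : sep.isPrefixOf (c :: rest) = true
        · rw [if_pos hp, if_pos hp]
          have hlen : 1 ≤ sep.length := by cases sep <;> simp_all
          apply ih
          · simp only [List.length_drop, List.length_cons] at h1 ⊢; omega
          · simp only [List.length_drop, List.length_cons] at h2 ⊢; omega
        · rw [if_neg hp, if_neg hp]
          apply ih
          · simp at h1 ⊢; omega
          · simp at h2 ⊢; omega

theorem pvSplitOn_of_not_infix {sep l : List Char} (h : ¬ sep <:+: l) :
    PySem.Chars.splitOn l sep = [l] := by
  have key : ∀ (fuel : Nat) (l' cur : List Char) (acc : List (List Char)), ¬ sep <:+: l' →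
      PySem.Chars.splitOn.go sep fuel l' cur acc = acc.reverse ++ [cur.reverse ++ l'] := by
    intro fuel
    induction fuel with
    | zero =>
      intro l' cur acc _
      rw [PySem.Chars.splitOn.go]; simp
    | succ fuel ih =>
      intro l' cur acc h'
      cases l' with
      | nil =>
        rw [PySem.Chars.splitOn.go]
        · simp
        all_goals omega
      | cons c rest =>
        rw [PySem.Chars.splitOn.go]
        have hp : sep.isPrefixOf (c :: rest) ≠ true := by
          intro hp
          exact h' (List.IsPrefix.isInfix (List.isPrefixOf_iff_prefix.mp hp))
        rw [if_neg hp]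
        rw [ih rest (c :: cur) acc (fun hi => h' (List.infix_cons_iff.mpr (Or.inr hi)))]
        simp
  unfold PySem.Chars.splitOn
  rw [key _ _ _ _ h]
  simp

theorem pvFind_eq_of {s sub : List Char} {k : Nat} (h1 : sub <+: s.drop k)
    (h2 : ∀ i < k, ¬ sub <+: s.drop i) : PySem.Chars.find s sub = (k : Int) := by
  have hin : sub <:+: s := h1.isInfix.trans (List.drop_suffix k s).isInfix
  have hnn : 0 ≤ PySem.Chars.find s sub := by
    rw [PySem.Chars.find_nonneg_iff]; exact hin
  obtain ⟨hp, hmin⟩ := PySem.Chars.find_spec hnn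
  set j := (PySem.Chars.find s sub).toNat with hj
  have : j = k := by
    rcases Nat.lt_trichotomy j k with h | h | h
    · exact absurd hp (h2 j h)
    · exact h
    · exact absurd h1 (hmin k h)
  omega

theorem pvFind_eq_zero {s sub : List Char} (h : sub <+: s) : PySem.Chars.find s sub = 0 := by
  have := pvFind_eq_of (s := s) (sub := sub) (k := 0) (by simpa using h) (by omega)
  simpa using this

theorem pvSplitOn_cons {sep l : List Char} (hsep : sep ≠ []) (h : sep <:+: l) :
    PySem.Chars.splitOn l sep =
      l.take (PySem.Chars.find l sep).toNat ::
        PySem.Chars.splitOn (l.drop ((PySem.Chars.find l sep).toNat + sep.length)) sep := by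
  induction l with
  | nil => simp at h; exact absurd h hsep
  | cons c rest ih =>
    by_cases hp : sep <+: (c :: rest)
    · have hf : PySem.Chars.find (c :: rest) sep = 0 := pvFind_eq_zero hp
      rw [hf]
      simp only [Int.toNat_zero, List.take_zero, Nat.zero_add]
      unfold PySem.Chars.splitOn
      rw [PySem.Chars.splitOn.go]
      rw [if_pos (List.isPrefixOf_iff_prefix.mpr hp)]
      rw [pvGo_split]
      have hslen : 1 ≤ sep.length := by cases sep <;> simp_all
      have hfuel : PySem.Chars.splitOn.go sep (c :: rest).length (List.drop sep.length (c :: rest)) [] [] =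
          PySem.Chars.splitOn.go sep ((List.drop sep.length (c :: rest)).length + 1) (List.drop sep.length (c :: rest)) [] [] := by
        apply pvGo_fuel sep hsep <;> simp
      rw [hfuel]
      cases hG : PySem.Chars.splitOn.go sep ((List.drop sep.length (c :: rest)).length + 1) (List.drop sep.length (c :: rest)) [] [] with
      | nil => exact absurd hG (pvGo_ne_nil _ _ _ _ _)
      | cons x xs => simp [pvConsHead]
    · have hrest : sep <:+: rest := (List.infix_cons_iff.mp h).resolve_left hp
      have hnnr : 0 ≤ PySem.Chars.find rest sep := by
        rw [PySem.Chars.find_nonneg_iff]; exact hrest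
      set j' := (PySem.Chars.find rest sep).toNat with hj'
      obtain ⟨hp', hmin'⟩ := PySem.Chars.find_spec hnnr
      have hf : PySem.Chars.find (c :: rest) sep = ((j' + 1 : Nat) : Int) := by
        apply pvFind_eq_of
        · simpa using hp'
        · intro i hi
          cases i with
          | zero => simpa using hp
          | succ i => simpa using hmin' i (by omega)
      rw [hf]
      simp only [Int.toNat_natCast]
      have hgo : PySem.Chars.splitOn (c :: rest) sep = pvConsHead [c] (PySem.Chars.splitOn rest sep) := by
        unfold PySem.Chars.splitOn
        rw [PySem.Chars.splitOn.go]
        rw [if_neg (fun hq => hp (List.isPrefixOf_iff_prefix.mp hq))]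
        rw [pvGo_split]
        have : PySem.Chars.splitOn.go sep (c :: rest).length rest [] [] =
            PySem.Chars.splitOn.go sep (rest.length + 1) rest [] [] := by
          apply pvGo_fuel sep hsep <;> simp
        rw [this]
        simp [pvConsHead]
      rw [hgo, ih hrest]
      simp only [pvConsHead, List.take_succ_cons, List.cons_append, List.nil_append]
      rw [show j' + 1 + sep.length = (j' + sep.length) + 1 by omega, List.drop_succ_cons]

theorem pvSplitOn_ne_nil (l sep : List Char) : PySem.Chars.splitOn l sep ≠ [] := by
  unfold PySem.Chars.splitOn
  exact pvGo_ne_nil _ _ _ _ _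

theorem pvJoin_splitOn_aux {sep : List Char} (hsep : sep ≠ []) :
    ∀ (n : Nat) (l : List Char), l.length ≤ n →
      PySem.Chars.join sep (PySem.Chars.splitOn l sep) = l := by
  intro n
  induction n with
  | zero =>
    intro l hl
    have : l = [] := by cases l <;> simp_all
    subst this
    rw [pvSplitOn_of_not_infix (by simpa using hsep), PySem.Chars.join_singleton]
  | succ n ih =>
    intro l hl
    by_cases h : sep <:+: l
    · have hnn : 0 ≤ PySem.Chars.find l sep := by
        rw [PySem.Chars.find_nonneg_iff]; exact h
      obtain ⟨hp, -⟩ := PySem.Chars.find_spec hnn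
      set j := (PySem.Chars.find l sep).toNat with hj
      have hslen : 1 ≤ sep.length := by cases sep <;> simp_all
      rw [pvSplitOn_cons hsep h]
      cases hG : PySem.Chars.splitOn (l.drop (j + sep.length)) sep with
      | nil => exact absurd hG (pvSplitOn_ne_nil _ _)
      | cons x xs =>
        have hrec : PySem.Chars.join sep (x :: xs) = l.drop (j + sep.length) := by
          rw [← hG]; exact ih _ (by simp; omega)
        rw [PySem.Chars.join_cons_cons _ _ x xs, hrec]
        obtain ⟨t, ht⟩ := hp
        have hdt : l.drop (j + sep.length) = t := by
          have h1 : List.drop sep.length (List.drop j l) = t := by rw [← ht]; simp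
          rwa [List.drop_drop] at h1
        rw [hdt]
        conv_rhs => rw [← List.take_append_drop j l, ← ht]
        simp
        rw [hj]
    · rw [pvSplitOn_of_not_infix h, PySem.Chars.join_singleton]

theorem pvJoin_splitOn {sep : List Char} (hsep : sep ≠ []) (l : List Char) :
    PySem.Chars.join sep (PySem.Chars.splitOn l sep) = l :=
  pvJoin_splitOn_aux hsep l.length l (le_refl _)


-- A's per-rule loop rephrased on an explicit (prefix, suffix) state (proof device only).
def pvScan (key val : List Char) (fuel : Nat) (pre suf : List Char)
    (acc : PySem.Set (List Char)) : PySem.Set (List Char) :=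
  match fuel with
  | 0 => acc
  | fuel + 1 =>
    if PySem.Chars.find suf key = -1 then acc
    else
      pvScan key val fuel
        ((pre ++ suf.take (PySem.Chars.find suf key).toNat) ++ key)
        (suf.drop ((PySem.Chars.find suf key).toNat + key.length))
        (PySem.Set.add acc
          ((pre ++ suf.take (PySem.Chars.find suf key).toNat) ++ val ++
           suf.drop ((PySem.Chars.find suf key).toNat + key.length)))


-- A's loop at keyIdx = pre.length on molecule pre ++ suf is pvScan on state (pre, suf).
theorem pvLoop_eq (key val : List Char) :
    ∀ (fuel : Nat) (pre suf : List Char) (acc : PySem.Set (List Char)),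
      pvALoop (pre ++ suf) key val fuel pre.length acc = pvScan key val fuel pre suf acc := by
  intro fuel
  induction fuel with
  | zero => intro pre suf acc; rfl
  | succ fuel ih =>
    intro pre suf acc
    rw [pvALoop, pvScan]
    have hdrop : (pre ++ suf).drop pre.length = suf := by simp
    rw [hdrop]
    by_cases hin : PySem.Chars.isIn key suf = true
    · have hfind : PySem.Chars.find suf key ≠ -1 := by
        rw [PySem.Chars.find_ne_neg_one_iff, ← PySem.Chars.isIn_iff_infix]; exact hin
      have hnn : 0 ≤ PySem.Chars.find suf key := by
        rw [PySem.Chars.find_nonneg_iff, ← PySem.Chars.isIn_iff_infix]; exact hin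
      rw [if_pos hin, if_neg hfind]
      set j : Nat := (PySem.Chars.find suf key).toNat with hj
      have hpref : key <+: suf.drop j := (PySem.Chars.find_spec hnn).1
      have hjle : j ≤ suf.length := by
        have := PySem.Chars.find_le_length (s := suf) (sub := key)
        omega
      obtain ⟨t, ht⟩ := hpref
      have hdt : suf.drop (j + key.length) = t := by
        have h1 : List.drop key.length (List.drop j suf) = t := by rw [← ht]; simp
        rwa [List.drop_drop] at h1
      have hsplit : pre ++ suf = (pre ++ suf.take j ++ key) ++ suf.drop (j + key.length) := by
        rw [hdt]
        conv_lhs => rw [← List.take_append_drop j suf, ← ht]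
        simp
      have htake : (pre ++ suf).take (pre.length + j) = pre ++ suf.take j :=
        List.take_length_add_append j
      have hdrop2 : (pre ++ suf).drop (pre.length + j + key.length) =
          suf.drop (j + key.length) := by
        rw [Nat.add_assoc]
        exact List.drop_length_add_append _
      rw [htake, hdrop2]
      have hlen : (pre ++ suf.take j ++ key).length = pre.length + j + key.length := by
        simp [List.length_take, Nat.min_eq_left hjle]
        omega
      rw [hsplit, ← hlen]
      exact ih _ _ _
    · have hfind : PySem.Chars.find suf key = -1 := by
        rw [PySem.Chars.find_eq_neg_one_iff, ← PySem.Chars.isIn_eq_false_iff]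
        simpa using hin
      rw [if_neg hin, if_pos hfind]

theorem pvScan_eq_split (key val : List Char) (hkey : key ≠ []) :
    ∀ (fuel : Nat) (suf pre : List Char) (acc : PySem.Set (List Char)),
      suf.length ≤ fuel →
      pvScan key val fuel pre suf acc =
        (List.range ((PySem.Chars.splitOn suf key).length - 1)).foldl
          (fun a i => PySem.Set.add a
            (pre ++ PySem.Chars.join key ((PySem.Chars.splitOn suf key).take (i + 1)) ++ val ++
             PySem.Chars.join key ((PySem.Chars.splitOn suf key).drop (i + 1))))
          acc := by
  intro fuel
  induction fuel with
  | zero =>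
    intro suf pre acc hf
    have hsuf : suf = [] := by cases suf <;> simp_all
    subst hsuf
    rw [pvSplitOn_of_not_infix (by simpa using hkey)]
    simp [pvScan]
  | succ fuel ih =>
    intro suf pre acc hf
    by_cases hfind : PySem.Chars.find suf key = -1
    · have hni : ¬ key <:+: suf := by rwa [← PySem.Chars.find_eq_neg_one_iff]
      rw [pvSplitOn_of_not_infix hni]
      rw [pvScan, if_pos hfind]
      simp
    · have hin : key <:+: suf := by
        have := PySem.Chars.find_ne_neg_one_iff (s := suf) (sub := key)
        tauto
      have hnn : 0 ≤ PySem.Chars.find suf key := by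
        rw [PySem.Chars.find_nonneg_iff]; exact hin
      set j := (PySem.Chars.find suf key).toNat with hj
      obtain ⟨hp, -⟩ := PySem.Chars.find_spec hnn
      have hklen : 1 ≤ key.length := by cases key <;> simp_all
      have hjle : j + key.length ≤ suf.length := by
        have h1 := PySem.Chars.find_le_length (s := suf) (sub := key)
        have h2 : key.length ≤ (suf.drop j).length := hp.length_le
        simp only [List.length_drop] at h2
        omega
      rw [pvScan, if_neg hfind]
      set suf' := suf.drop (j + key.length) with hsuf'
      rw [ih suf' ((pre ++ suf.take j) ++ key) _ (by simp [hsuf']; omega)]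
      -- now rewrite the RHS over splitOn suf key = take j :: splitOn suf'
      rw [pvSplitOn_cons hkey hin]
      rw [← hj, ← hsuf']
      cases hP : PySem.Chars.splitOn suf' key with
      | nil => exact absurd hP (pvSplitOn_ne_nil _ _)
      | cons x xs =>
        have hjoin : PySem.Chars.join key (x :: xs) = suf' := by
          rw [← hP]; exact pvJoin_splitOn hkey suf'
        simp only [List.length_cons, Nat.add_sub_cancel, List.range_succ_eq_map,
          List.foldl_cons, List.foldl_map]
        congr 1
        · funext a i
          simp only [Nat.succ_eq_add_one, List.take_succ_cons, List.drop_succ_cons,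
            PySem.Chars.join_cons_cons, List.append_assoc]
        · simp only [Nat.zero_add, List.take_succ_cons, List.take_zero, List.drop_succ_cons,
            List.drop_zero, PySem.Chars.join_singleton, hjoin]

-- ===== VERDICT (by name: the statement is the Claim_ definition above) =====
theorem iterateMolecule_spec : Claim_equal_iterateMolecule := by
  intro molecule rules _ hpre
  unfold Spec_iterateMolecule iterateMolecule iterateMolecule_alt
  congr 1
  apply PySem.List.foldl_congr_mem
  intro acc kv hmem
  have hkey : kv.1.toList ≠ [] := fun h => hpre kv hmem (String.toList_eq_nil_iff.mp h)
  have h1 := pvLoop_eq kv.1.toList kv.2.toList (molecule.toList.length + 1) [] molecule.toList acc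
  have h2 := pvScan_eq_split kv.1.toList kv.2.toList hkey (molecule.toList.length + 1)
    molecule.toList [] acc (by omega)
  simp only [List.nil_append] at h1 h2
  rw [← h1] at h2
  simpa using h2
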